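-- pv_equiv track=rewrite | github.com/sunnyyeti/Leetcode-solutions | 914 X of a Kind in a Deck of Cards.py | hasGroupsSizeX
-- ===== SOURCE A (Python) =====
-- from typing import List
--
-- from collections import Counter
-- from functools import reduce
--
-- def hasGroupsSizeX(deck: List[int]) -> bool:
--     cnt = Counter(deck)
--     min_cnt = min(cnt.values())
--     if min_cnt < 2:
--         return False
--
--     def gcd(a, b):
--         if a < b:
--             a, b = b, a
--         while b:
--             a, b = b, a % b
--         return a
--     counts = sorted(set(cnt.values()))
--     gcd = reduce(lambda x, y: gcd(x, y), counts)
--     if gcd >= 2: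
--         return True
--     return False
-- ===== SOURCE B (Python) =====
-- from typing import List
-- from collections import Counter
--
--
-- def hasGroupsSizeX(deck: List[int]) -> bool:
--     cnt = Counter(deck)
--     m = min(cnt.values())
--     for g in range(2, m + 1):
--         if all(c % g == 0 for c in cnt.values()):
--             return True
--     return False
-- ===== Notes on version B (the rewrite author's own statement) =====
-- stated objective: simpler
-- what changed: Replaces the hand-written GCD reduction over the sorted set of counts with a direct trial search of candidate group sizes g from 2 up to the minimum count, returning True as soon as one g divides every count.
import Mathlib
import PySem

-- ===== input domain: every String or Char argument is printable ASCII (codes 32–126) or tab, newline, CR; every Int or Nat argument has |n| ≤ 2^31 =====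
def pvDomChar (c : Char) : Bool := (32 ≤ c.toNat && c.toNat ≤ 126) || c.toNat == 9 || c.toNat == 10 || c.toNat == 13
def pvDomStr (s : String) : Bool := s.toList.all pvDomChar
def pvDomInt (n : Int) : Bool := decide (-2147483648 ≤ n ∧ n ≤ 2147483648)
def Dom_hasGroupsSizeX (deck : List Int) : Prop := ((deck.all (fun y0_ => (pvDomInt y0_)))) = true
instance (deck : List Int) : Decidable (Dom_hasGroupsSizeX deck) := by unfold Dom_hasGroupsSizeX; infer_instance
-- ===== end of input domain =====

-- B replaces A's GCD reduction over the sorted set of counts by a direct trial search of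
-- group sizes g = 2 .. min count; equivalence of the RETURN values is proved on nonempty decks.

-- ===== PORT A =====
-- inner 'while b: a, b = b, a % b' loop of A's local gcd
def pyGcdLoop (a b : Int) : Int :=
  if h : b = 0 then a else pyGcdLoop b (PySem.Int.mod a b)
termination_by b.natAbs
decreasing_by
  rcases lt_or_gt_of_ne h with hb | hb
  · have := PySem.Int.mod_neg_bounds a hb; omega
  · have h1 := PySem.Int.mod_nonneg a hb; have h2 := PySem.Int.mod_lt a hb; omega

-- A's local 'def gcd(a, b)': swap so a ≥ b, then the Euclid loop
def pyGcd (a b : Int) : Int :=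
  if a < b then pyGcdLoop b a else pyGcdLoop a b

def hasGroupsSizeX (deck : List Int) : Bool :=
  let cnt := PySem.Dict.counter deck
  match PySem.List.min? cnt.values (fun x => x) with
  | none => false  -- unreachable under Pre_: Python's min([]) raises ValueError
  | some min_cnt =>
    if min_cnt < 2 then false
    else
      match PySem.List.sorted (PySem.Set.ofList cnt.values) (fun x => x) false with
      | [] => false  -- unreachable under Pre_: reduce([]) would raise TypeError
      | c :: rest => decide (2 ≤ rest.foldl pyGcd c)

-- ===== PORT B =====
def hasGroupsSizeX_alt (deck : List Int) : Bool :=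
  let cnt := PySem.Dict.counter deck
  match PySem.List.min? cnt.values (fun x => x) with
  | none => false  -- unreachable under Pre_: Python's min([]) raises ValueError
  | some m =>
    (PySem.List.pyRange 2 (m + 1) 1).any
      (fun g => cnt.values.all (fun c => PySem.Int.mod c g == 0))

-- ===== PRECONDITION & SPEC =====
-- Pre_ excludes only the empty deck, on which both Pythons raise ValueError (min of no counts).
def Pre_hasGroupsSizeX (deck : List Int) : Prop := deck ≠ []
instance (deck : List Int) : Decidable (Pre_hasGroupsSizeX deck) := by unfold Pre_hasGroupsSizeX; infer_instance
def pvWitness_hasGroupsSizeX : List Int := [1, 1, 2, 2]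

def Spec_hasGroupsSizeX (deck : List Int) (out : Bool) : Prop := out = hasGroupsSizeX_alt deck
instance (deck : List Int) (out : Bool) : Decidable (Spec_hasGroupsSizeX deck out) := by unfold Spec_hasGroupsSizeX; infer_instance

-- ===== CLAIM (what is proved, stated in full; the proofs are below) =====
def Claim_equal_hasGroupsSizeX : Prop := ∀ (deck : List Int), Dom_hasGroupsSizeX deck → Pre_hasGroupsSizeX deck → Spec_hasGroupsSizeX deck (hasGroupsSizeX deck)

-- ===== LEMMAS AND PROOFS =====

theorem pyGcdLoop_eq_gcd (a b : Int) (ha : 0 ≤ a) (hb : 0 ≤ b) :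
    pyGcdLoop a b = (Int.gcd a b : Int) := by
  by_cases h : b = 0
  · subst h; rw [pyGcdLoop]; simp [Int.natAbs_of_nonneg ha]
  · have hbpos : 0 < b := lt_of_le_of_ne hb (Ne.symm h)
    rw [pyGcdLoop, dif_neg h, PySem.Int.mod_eq_emod_of_pos hbpos]
    have h1 : 0 ≤ a % b := Int.emod_nonneg a h
    have h2 : a % b < b := Int.emod_lt_of_pos a hbpos
    rw [pyGcdLoop_eq_gcd b (a % b) hb h1, Int.gcd_comm, Int.gcd_emod]
termination_by b.natAbs
decreasing_by omega

theorem pyGcd_eq_gcd (a b : Int) (ha : 0 ≤ a) (hb : 0 ≤ b) :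
    pyGcd a b = (Int.gcd a b : Int) := by
  unfold pyGcd
  split_ifs with h
  · rw [pyGcdLoop_eq_gcd b a hb ha, Int.gcd_comm]
  · exact pyGcdLoop_eq_gcd a b ha hb

-- the GCD fold over a list of positive counts: positive, divides the seed and every element,
-- and every common divisor of seed and elements divides it
theorem foldl_pyGcd_props (l : List Int) (a : Int) (hapos : 0 < a) (hl : ∀ v ∈ l, 0 < v) :
    0 < l.foldl pyGcd a ∧ l.foldl pyGcd a ∣ a ∧ (∀ v ∈ l, l.foldl pyGcd a ∣ v) ∧
      (∀ d : Int, d ∣ a → (∀ v ∈ l, d ∣ v) → d ∣ l.foldl pyGcd a) := by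
  induction l generalizing a with
  | nil => exact ⟨hapos, dvd_refl a, by simp, fun d hd _ => hd⟩
  | cons v t ih =>
    have hv : 0 < v := hl v (List.mem_cons_self ..)
    have hg : pyGcd a v = (Int.gcd a v : Int) := pyGcd_eq_gcd a v (le_of_lt hapos) (le_of_lt hv)
    have hgpos : 0 < pyGcd a v := by
      rw [hg]; exact_mod_cast Int.gcd_pos_of_ne_zero_left v (by omega)
    obtain ⟨p1, p2, p3, p4⟩ := ih (pyGcd a v) hgpos (fun x hx => hl x (List.mem_cons_of_mem _ hx))
    have hdva : pyGcd a v ∣ a := by rw [hg]; exact Int.gcd_dvd_left a v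
    have hdvv : pyGcd a v ∣ v := by rw [hg]; exact Int.gcd_dvd_right a v
    refine ⟨p1, dvd_trans p2 hdva, ?_, ?_⟩
    · intro x hx
      rcases List.mem_cons.mp hx with rfl | hx
      · exact dvd_trans p2 hdvv
      · exact p3 x hx
    · intro d hda hdl
      refine p4 d ?_ (fun x hx => hdl x (List.mem_cons_of_mem _ hx))
      rw [hg]; exact Int.dvd_coe_gcd hda (hdl v (List.mem_cons_self ..))

-- the values list of Counter(deck) is the per-distinct-element count list
theorem counter_values (deck : List Int) :
    (PySem.Dict.counter deck).values
      = (PySem.Set.ofList deck).map (fun k => (List.count k deck : Int)) := by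
  show ((PySem.Dict.counter deck).items).map Prod.snd = _
  rw [PySem.Dict.items_counter, List.map_map]
  rfl

theorem counter_values_pos (deck : List Int) :
    ∀ v ∈ (PySem.Dict.counter deck).values, 0 < v := by
  rw [counter_values]
  intro v hv
  obtain ⟨k, hk, rfl⟩ := List.mem_map.mp hv
  have : k ∈ deck := (PySem.Set.mem_ofList _ _).mp hk
  have : 0 < List.count k deck := List.count_pos_iff.mpr this
  exact_mod_cast this

-- A's and B's result as a function of the (nonempty, positive) list of counts
theorem counts_eq (vals : List Int) (hvpos : ∀ v ∈ vals, 0 < v) :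
    (match PySem.List.min? vals (fun x => x) with
     | none => false
     | some min_cnt =>
       if min_cnt < 2 then false
       else
         match PySem.List.sorted (PySem.Set.ofList vals) (fun x => x) false with
         | [] => false
         | c :: rest => decide (2 ≤ rest.foldl pyGcd c))
    = (match PySem.List.min? vals (fun x => x) with
       | none => false
       | some m =>
         (PySem.List.pyRange 2 (m + 1) 1).any
           (fun g => vals.all (fun c => PySem.Int.mod c g == 0))) := by
  cases hmin : PySem.List.min? vals (fun x => x) with
  | none => rfl
  | some m =>
    have hmmem : m ∈ vals := PySem.List.min?_mem hmin
    have hmpos : 0 < m := hvpos m hmmem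
    simp only
    by_cases hm2 : m < 2
    · -- m = 1: A returns False; B's range(2, m+1) is empty
      rw [if_pos hm2]
      have : PySem.List.pyRange 2 (m + 1) 1 = [] := by
        rw [PySem.List.pyRange_one]
        have : (m + 1 - 2).toNat = 0 := by omega
        rw [this]; rfl
      rw [this]; rfl
    · rw [if_neg hm2]
      -- the sorted distinct counts
      have hSperm := PySem.List.sorted_perm (PySem.Set.ofList vals) (fun x => x) false
      have hSmem : ∀ x, x ∈ PySem.List.sorted (PySem.Set.ofList vals) (fun x => x) false ↔ x ∈ vals := by
        intro x
        rw [hSperm.mem_iff, PySem.Set.mem_ofList]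
      cases hSc : PySem.List.sorted (PySem.Set.ofList vals) (fun x => x) false with
      | nil =>
        rw [hSc] at hSmem
        have := (hSmem m).mpr hmmem
        simp at this
      | cons c rest =>
        rw [hSc] at hSmem
        have hcmem : c ∈ vals := (hSmem c).mp (List.mem_cons_self ..)
        obtain ⟨Gpos, Gdvda, Gdvdl, Gmax⟩ := foldl_pyGcd_props rest c (hvpos c hcmem)
          (fun v hv => hvpos v ((hSmem v).mp (List.mem_cons_of_mem _ hv)))
        set G := rest.foldl pyGcd c with hG
        have Gdvd : ∀ v ∈ vals, G ∣ v := by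
          intro v hv
          rcases List.mem_cons.mp ((hSmem v).mpr hv) with rfl | hvr
          · exact Gdvda
          · exact Gdvdl v hvr
        change decide (2 ≤ G) = _
        by_cases hG2 : 2 ≤ G
        · -- A true; B finds g = G
          rw [decide_eq_true hG2]
          symm
          rw [List.any_eq_true]
          refine ⟨G, ?_, ?_⟩
          · rw [PySem.List.mem_pyRange_one]
            have hdm : G ∣ m := Gdvd m hmmem
            have : G ≤ m := Int.le_of_dvd hmpos hdm
            omega
          · rw [List.all_eq_true]
            intro c' hc'
            simpa [PySem.Int.mod_eq_zero_iff_dvd] using Gdvd c' hc'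
        · -- A false; any common divisor g of the counts divides G < 2, so g < 2
          rw [decide_eq_false hG2]
          symm
          rw [List.any_eq_false]
          intro g hg
          rw [PySem.List.mem_pyRange_one] at hg
          intro hall
          rw [List.all_eq_true] at hall
          have hgdvd : ∀ v ∈ vals, g ∣ v := by
            intro v hv
            simpa [PySem.Int.mod_eq_zero_iff_dvd] using hall v hv
          have hdG : g ∣ G :=
            Gmax g (hgdvd c hcmem)
              (fun v hv => hgdvd v ((hSmem v).mp (List.mem_cons_of_mem _ hv)))
          have := Int.le_of_dvd Gpos hdG
          omega

-- ===== VERDICT (by name: the statement is the Claim_ definition above) =====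
theorem hasGroupsSizeX_spec : Claim_equal_hasGroupsSizeX := by
  intro deck _ _
  unfold Spec_hasGroupsSizeX hasGroupsSizeX hasGroupsSizeX_alt
  exact counts_eq (PySem.Dict.counter deck).values (counter_values_pos deck)
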